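-- pv_equiv track=rewrite | github.com/wgfajardom/portfolio | Challenges/10_largest_rectangle_in_histogram/code_largest_rectangle_in_histogram.py | dims_rectangle_by_bin
-- ===== SOURCE A (Python) =====
-- def dims_rectangle_by_bin(heights, bin_ref):
--
--         # Number of bins in the histogram
--         lh = len(heights)
--
--         # Identifying bins having a height larger or equal than the reference height ('bin_height')
--         ii = bin_ref
--         bin_height = heights[ii]
--         fil_h = [h>=bin_height for h in heights]
--
--         # Find width using the edges of the rectangle ('ind_sta' and 'ind_end')
--         # Case when the reference bin is at the left edge of the histogram
--         if ii == 0: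
--             ind_sta = 0
--             if False in fil_h[ii:]:
--                 ind_end = fil_h.index(False)
--             else:
--                 ind_end = lh
--
--         # Case when the reference bin is at the right edge of the histogram
--         elif ii == lh-1:
--             if False in fil_h[:ii]:
--                 r_fil_h = fil_h[::-1]
--                 ind_sta = lh-r_fil_h.index(False)
--             else:
--                 ind_sta = 0
--             ind_end = lh
--
--         # The other cases
--         else:
--             if False in fil_h[:ii]:
--                 fil_h_aux = fil_h[:ii]
--                 r_fil_aux = fil_h_aux[::-1]
--                 ind_sta = len(fil_h_aux)-r_fil_aux.index(False)
--             else: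
--                 ind_sta = 0
--             if False in fil_h[ii:]:
--                 fil_h_aux = fil_h[ii:]
--                 ind_end = ii+fil_h_aux.index(False)
--             else:
--                 ind_end = lh
--
--         # Computing rectangle dimensions (width and height), assuming a constant bin width
--         bin_width = 1
--         rectangle_width = bin_width*(ind_end-ind_sta)
--         rectangle_height = bin_height
--
--         return rectangle_width, rectangle_height, ind_sta, ind_end
-- ===== SOURCE B (Python) =====
-- def dims_rectangle_by_bin(heights, bin_ref):
--     n = len(heights)
--     if bin_ref < 0:
--         bin_ref += n  # normalize: Python's heights[bin_ref] anchors here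
--     bin_height = heights[bin_ref]
--     left = bin_ref
--     while left - 1 >= 0 and heights[left - 1] >= bin_height:
--         left -= 1
--     right = bin_ref
--     while right + 1 < n and heights[right + 1] >= bin_height:
--         right += 1
--     return right + 1 - left, bin_height, left, right + 1
-- ===== Notes on version B (the rewrite author's own statement) =====
-- stated objective: simpler
-- what changed: Replaces the boolean mask list, the reversed-slice .index(False) searches and the three-way edge casework by a direct two-pointer expansion outward from the (normalized) reference bin.
-- intended difference: For negative bin_ref with some strictly lower bar at or after the wrapped position, A returns a negative ind_end and width (it adds the first-lower offset to the still-negative index, e.g. A([2,1],-2)=(-1,2,0,-1)), while B returns the intended rectangle (1,2,0,1); a width/end index can only sensibly be non-negative. — e.g. on dims_rectangle_by_bin([2, 1], -2): A returns (-1, 2, 0, -1), B returns (1, 2, 0, 1)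
import Mathlib
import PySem

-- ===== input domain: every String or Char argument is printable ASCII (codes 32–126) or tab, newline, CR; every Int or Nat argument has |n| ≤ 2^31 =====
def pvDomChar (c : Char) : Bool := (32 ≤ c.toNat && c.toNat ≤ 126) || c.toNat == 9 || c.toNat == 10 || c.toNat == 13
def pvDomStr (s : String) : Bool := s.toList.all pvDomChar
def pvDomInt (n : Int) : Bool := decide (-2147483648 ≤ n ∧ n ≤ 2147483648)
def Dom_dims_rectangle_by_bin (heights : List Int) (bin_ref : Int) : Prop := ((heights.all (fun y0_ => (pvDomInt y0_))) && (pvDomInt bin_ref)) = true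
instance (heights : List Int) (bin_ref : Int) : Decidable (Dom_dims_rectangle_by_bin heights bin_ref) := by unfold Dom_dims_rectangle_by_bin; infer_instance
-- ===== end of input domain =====

-- B replaces A's boolean mask + reversed-slice index searches + three-way edge casework by a
-- two-pointer expansion from the normalized reference bin (objective: simpler); on negative
-- bin_ref with a lower bar in the wrapped suffix A's ind_end/width are wrong (see D_ below).

-- ===== PORT A =====
def dims_rectangle_by_bin (heights : List Int) (bin_ref : Int) : Int × Int × Int × Int :=
  let lh : Int := heights.length
  let ii : Int := bin_ref
  match PySem.List.pyGet? heights ii with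
  | none => (0, 0, 0, 0)  -- heights[ii] raises IndexError here: excluded by Pre_
  | some bin_height =>
    let fil_h : List Bool := heights.map (fun h => decide (h ≥ bin_height))
    let se : Int × Int :=
      if ii = 0 then
        let ind_sta : Int := 0
        let ind_end : Int :=
          if false ∈ PySem.List.slice fil_h (some ii) none then
            ((PySem.List.index? fil_h false).getD 0 : Nat)  -- guarded by the membership test
          else lh
        (ind_sta, ind_end)
      else if ii = lh - 1 then
        let ind_sta : Int :=
          if false ∈ PySem.List.slice fil_h none (some ii) then
            let r_fil_h := fil_h.reverse  -- fil_h[::-1]; exact: PySem.List.slice?_none_none_neg_one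
            lh - ((PySem.List.index? r_fil_h false).getD 0 : Nat)
          else 0
        (ind_sta, lh)
      else
        let ind_sta : Int :=
          if false ∈ PySem.List.slice fil_h none (some ii) then
            let fil_h_aux := PySem.List.slice fil_h none (some ii)
            let r_fil_aux := fil_h_aux.reverse  -- fil_h_aux[::-1]
            (fil_h_aux.length : Int) - ((PySem.List.index? r_fil_aux false).getD 0 : Nat)
          else 0
        let ind_end : Int :=
          if false ∈ PySem.List.slice fil_h (some ii) none then
            let fil_h_aux := PySem.List.slice fil_h (some ii) none
            ii + ((PySem.List.index? fil_h_aux false).getD 0 : Nat)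
          else lh
        (ind_sta, ind_end)
    let bin_width : Int := 1
    (bin_width * (se.2 - se.1), bin_height, se.1, se.2)

-- ===== PORT B =====
-- while left - 1 >= 0 and heights[left-1] >= bin_height: left -= 1   (recursion on left)
def pvLeftScan (heights : List Int) (bin_height : Int) : Nat → Nat
  | 0 => 0
  | l + 1 => if heights.getD l 0 ≥ bin_height then pvLeftScan heights bin_height l else l + 1

-- while right + 1 < n and heights[right+1] >= bin_height: right += 1
-- (fuel = heights.length bounds the loop; structural recursion so the kernel can evaluate it)
def pvRightScan (heights : List Int) (bin_height : Int) : Nat → Nat → Nat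
  | 0, r => r
  | fuel + 1, r =>
    if r + 1 < heights.length then
      if heights.getD (r + 1) 0 ≥ bin_height then pvRightScan heights bin_height fuel (r + 1)
      else r
    else r

def dims_rectangle_by_bin_alt (heights : List Int) (bin_ref : Int) : Int × Int × Int × Int :=
  let n : Int := heights.length
  let b : Int := if bin_ref < 0 then bin_ref + n else bin_ref
  let k : Nat := b.toNat
  let bin_height : Int := heights.getD k 0   -- in range under Pre_
  let left : Nat := pvLeftScan heights bin_height k
  let right : Nat := pvRightScan heights bin_height heights.length k
  ((right : Int) + 1 - left, bin_height, left, (right : Int) + 1)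

-- ===== PRECONDITION & SPEC =====
-- Pre_ excludes exactly the IndexError inputs: both A and B raise iff bin_ref is out of range.
def Pre_dims_rectangle_by_bin (heights : List Int) (bin_ref : Int) : Prop :=
  -(heights.length : Int) ≤ bin_ref ∧ bin_ref < heights.length
instance (heights : List Int) (bin_ref : Int) : Decidable (Pre_dims_rectangle_by_bin heights bin_ref) := by unfold Pre_dims_rectangle_by_bin; infer_instance

def pvWitness_dims_rectangle_by_bin : List Int × Int := ([2, 1, 1, 2, 3], 3)

-- On negative bin_ref whose wrapped position is followed (at or after it) by a strictly lower
-- bar, A returns a negative ind_end and width (it adds the offset of the first lower bar to the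
-- still-negative index), e.g. A([2,1],-2) = (-1,2,0,-1); B returns the intended (1,2,0,1) —
-- a rectangle width and end index can only sensibly be non-negative.
def D_dims_rectangle_by_bin (heights : List Int) (bin_ref : Int) : Prop :=
  bin_ref < 0 ∧ -(heights.length : Int) ≤ bin_ref ∧
    ∃ x ∈ heights.drop (bin_ref + heights.length).toNat,
      x < heights.getD (bin_ref + heights.length).toNat 0
instance (heights : List Int) (bin_ref : Int) : Decidable (D_dims_rectangle_by_bin heights bin_ref) := by unfold D_dims_rectangle_by_bin; infer_instance

def Spec_dims_rectangle_by_bin (heights : List Int) (bin_ref : Int) (out : Int × Int × Int × Int) : Prop := ¬ D_dims_rectangle_by_bin heights bin_ref → out = dims_rectangle_by_bin_alt heights bin_ref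
instance (heights : List Int) (bin_ref : Int) (out : Int × Int × Int × Int) : Decidable (Spec_dims_rectangle_by_bin heights bin_ref out) := by unfold Spec_dims_rectangle_by_bin; infer_instance

def pvDiffWitness_dims_rectangle_by_bin : List Int × Int := ([2, 1], -2)
def pvDiffWitnessOut_dims_rectangle_by_bin : (Int × Int × Int × Int) × (Int × Int × Int × Int) :=
  ((-1, 2, 0, -1), (1, 2, 0, 1))

-- ===== CLAIM (what is proved, stated in full; the proofs are below) =====
def Claim_unchanged_dims_rectangle_by_bin : Prop := ∀ (heights : List Int) (bin_ref : Int), Dom_dims_rectangle_by_bin heights bin_ref → Pre_dims_rectangle_by_bin heights bin_ref → Spec_dims_rectangle_by_bin heights bin_ref (dims_rectangle_by_bin heights bin_ref)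
def Claim_changed_dims_rectangle_by_bin : Prop := Dom_dims_rectangle_by_bin (pvDiffWitness_dims_rectangle_by_bin.1) (pvDiffWitness_dims_rectangle_by_bin.2) ∧ Pre_dims_rectangle_by_bin (pvDiffWitness_dims_rectangle_by_bin.1) (pvDiffWitness_dims_rectangle_by_bin.2) ∧ D_dims_rectangle_by_bin (pvDiffWitness_dims_rectangle_by_bin.1) (pvDiffWitness_dims_rectangle_by_bin.2) ∧ dims_rectangle_by_bin (pvDiffWitness_dims_rectangle_by_bin.1) (pvDiffWitness_dims_rectangle_by_bin.2) = pvDiffWitnessOut_dims_rectangle_by_bin.1 ∧ dims_rectangle_by_bin_alt (pvDiffWitness_dims_rectangle_by_bin.1) (pvDiffWitness_dims_rectangle_by_bin.2) = pvDiffWitnessOut_dims_rectangle_by_bin.2 ∧ pvDiffWitnessOut_dims_rectangle_by_bin.1 ≠ pvDiffWitnessOut_dims_rectangle_by_bin.2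
def Claim_exact_dims_rectangle_by_bin : Prop := ∀ (heights : List Int) (bin_ref : Int), Dom_dims_rectangle_by_bin heights bin_ref → Pre_dims_rectangle_by_bin heights bin_ref → D_dims_rectangle_by_bin heights bin_ref → dims_rectangle_by_bin heights bin_ref ≠ dims_rectangle_by_bin_alt heights bin_ref

-- ===== LEMMAS AND PROOFS =====

def pvFirstLow (h : Int) : List Int → Nat
  | [] => 0
  | x :: xs => if x < h then 0 else pvFirstLow h xs + 1

def pvLastLowSucc (h : Int) : List Int → Nat
  | [] => 0
  | x :: xs =>
    let r := pvLastLowSucc h xs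
    if r = 0 then (if x < h then 1 else 0) else r + 1

lemma pv_mem_false (h : Int) (l : List Int) :
    (false ∈ l.map fun x => decide (x ≥ h)) ↔ ∃ x ∈ l, x < h := by
  simp [List.mem_map]

lemma pv_index_first (h : Int) (l : List Int) (hl : ∃ x ∈ l, x < h) :
    PySem.List.index? (l.map fun x => decide (x ≥ h)) false = some (pvFirstLow h l) := by
  induction l with
  | nil => simp at hl
  | cons a t ih =>
    by_cases ha : a < h
    · rw [List.map_cons]
      have hfa : decide (a ≥ h) = false := by simp; omega
      rw [hfa, PySem.List.index?_cons_self]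
      simp [pvFirstLow, ha]
    · have ht : ∃ x ∈ t, x < h := by
        rcases hl with ⟨x, hx, hxh⟩
        rcases List.mem_cons.mp hx with rfl | hx
        · omega
        · exact ⟨x, hx, hxh⟩
      rw [List.map_cons]
      have hd : decide (a ≥ h) = true := by simp; omega
      rw [hd, PySem.List.index?_cons_of_ne _ (by decide), ih ht]
      simp [pvFirstLow, ha]

lemma pv_firstLow_all (h : Int) (l : List Int) (hl : ¬ ∃ x ∈ l, x < h) :
    pvFirstLow h l = l.length := by
  induction l with
  | nil => simp [pvFirstLow]
  | cons a t ih =>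
    push_neg at hl
    have h1 := hl a (by simp)
    rw [pvFirstLow, if_neg (by omega), List.length_cons,
      ih (by push_neg; intro x hx; exact hl x (by simp [hx]))]

lemma pv_lastLow_all (h : Int) (l : List Int) (hl : ¬ ∃ x ∈ l, x < h) :
    pvLastLowSucc h l = 0 := by
  induction l with
  | nil => simp [pvLastLowSucc]
  | cons a t ih =>
    push_neg at hl
    have h1 := hl a (by simp)
    have h2 : pvLastLowSucc h t = 0 := ih (by push_neg; intro x hx; exact hl x (by simp [hx]))
    simp [pvLastLowSucc, h2]; omega

lemma pv_lastLow_ne (h : Int) (l : List Int) (hl : ∃ x ∈ l, x < h) :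
    pvLastLowSucc h l ≠ 0 := by
  induction l with
  | nil => simp at hl
  | cons a t ih =>
    simp only [pvLastLowSucc]
    rcases hl with ⟨x, hx, hxh⟩
    rcases List.mem_cons.mp hx with rfl | hx
    · split_ifs <;> omega
    · have := ih ⟨x, hx, hxh⟩
      split_ifs <;> omega

lemma pv_lastLow_le (h : Int) (l : List Int) : pvLastLowSucc h l ≤ l.length := by
  induction l with
  | nil => simp [pvLastLowSucc]
  | cons a t ih =>
    simp only [pvLastLowSucc, List.length_cons]
    split_ifs <;> omega

lemma pv_index_rev (h : Int) (l : List Int) (hl : ∃ x ∈ l, x < h) :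
    PySem.List.index? ((l.map fun x => decide (x ≥ h)).reverse) false
      = some (l.length - pvLastLowSucc h l) := by
  induction l with
  | nil => simp at hl
  | cons a t ih =>
    rw [List.map_cons, List.reverse_cons]
    by_cases ht : ∃ x ∈ t, x < h
    · have hmem : false ∈ (t.map fun x => decide (x ≥ h)).reverse := by
        rw [List.mem_reverse, pv_mem_false]; exact ht
      rw [PySem.List.index?_append_of_mem _ hmem, ih ht]
      have h0 := pv_lastLow_ne h t ht
      have hle := pv_lastLow_le h t
      simp only [pvLastLowSucc, List.length_cons]
      rw [if_neg h0]
      congr 1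
      omega
    · have h2 : pvLastLowSucc h t = 0 := pv_lastLow_all h t ht
      have ha : a < h := by
        rcases hl with ⟨x, hx, hxh⟩
        rcases List.mem_cons.mp hx with rfl | hx
        · exact hxh
        · exact absurd ⟨x, hx, hxh⟩ ht
      have hnm : false ∉ (t.map fun x => decide (x ≥ h)).reverse := by
        rw [List.mem_reverse, pv_mem_false]; exact ht
      have hfa : decide (a ≥ h) = false := by simp; omega
      rw [hfa, PySem.List.index?_append_singleton_self _ _ hnm]
      simp [pvLastLowSucc, h2, ha, List.length_reverse]

lemma pv_lastLow_append (h x : Int) (ys : List Int) :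
    pvLastLowSucc h (ys ++ [x]) = if x < h then ys.length + 1 else pvLastLowSucc h ys := by
  induction ys with
  | nil => by_cases hx : x < h <;> simp [pvLastLowSucc, hx]
  | cons a t ih =>
    by_cases hx : x < h
    · simp only [List.cons_append, pvLastLowSucc, ih, if_pos hx, List.length_cons]
      simp
    · simp only [List.cons_append, pvLastLowSucc, ih, if_neg hx]

lemma pv_leftScan_eq (l : List Int) (h : Int) (k : Nat) (hk : k ≤ l.length) :
    pvLeftScan l h k = pvLastLowSucc h (l.take k) := by
  induction k with
  | zero => simp [pvLeftScan, pvLastLowSucc]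
  | succ m ih =>
    have hm : m < l.length := by omega
    have htake : l.take (m + 1) = l.take m ++ [l[m]] := by
      rw [List.take_succ]; simp [List.getElem?_eq_getElem hm]
    rw [pvLeftScan, htake, pv_lastLow_append]
    have hget : l.getD m 0 = l[m] := List.getD_eq_getElem l 0 hm
    by_cases hge : l[m] ≥ h
    · rw [if_pos (by rw [hget]; exact hge), if_neg (by omega), ih (by omega)]
    · rw [if_neg (by rw [hget]; omega), if_pos (by omega)]
      simp [List.length_take, Nat.min_eq_left (by omega : m ≤ l.length)]

lemma pv_rightScan_eq (l : List Int) (h : Int) (fuel k : Nat) (hk : k < l.length)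
    (hfuel : l.length ≤ fuel + k + 1) (hge : l.getD k 0 ≥ h) :
    pvRightScan l h fuel k + 1 = k + pvFirstLow h (l.drop k) := by
  induction fuel generalizing k with
  | zero =>
    have hlen : l.length = k + 1 := by omega
    rw [pvRightScan]
    have hdrop : l.drop k = [l[k]] := by
      rw [List.drop_eq_getElem_cons hk]
      have : l.drop (k + 1) = [] := List.drop_eq_nil_of_le (by omega)
      rw [this]
    rw [hdrop, pvFirstLow, if_neg (by have := List.getD_eq_getElem l 0 hk; omega)]
    rfl
  | succ f ih =>
    rw [pvRightScan]
    have hgetk : l.getD k 0 = l[k] := List.getD_eq_getElem l 0 hk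
    by_cases h1 : k + 1 < l.length
    · rw [if_pos h1]
      have hget1 : l.getD (k + 1) 0 = l[k + 1] := List.getD_eq_getElem l 0 h1
      by_cases h2 : l[k + 1] ≥ h
      · rw [if_pos (by rw [hget1]; exact h2), ih (k + 1) h1 (by omega) (by rw [hget1]; exact h2)]
        rw [List.drop_eq_getElem_cons hk, pvFirstLow, if_neg (by omega)]
        omega
      · rw [if_neg (by rw [hget1]; omega)]
        rw [List.drop_eq_getElem_cons hk, pvFirstLow, if_neg (by omega)]
        rw [List.drop_eq_getElem_cons h1, pvFirstLow, if_pos (by omega)]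
    · rw [if_neg h1]
      have hlen : l.length = k + 1 := by omega
      have hdrop : l.drop k = [l[k]] := by
        rw [List.drop_eq_getElem_cons hk]
        have : l.drop (k + 1) = [] := List.drop_eq_nil_of_le (by omega)
        rw [this]
      rw [hdrop, pvFirstLow, if_neg (by omega)]
      rfl

def pvKn (n : Nat) (i : Int) : Nat := (if i < 0 then i + n else i).toNat

lemma pv_slice_from_eq {α : Type} (xs : List α) (i : Int)
    (h1 : -(xs.length : Int) ≤ i) (h2 : i < xs.length) :
    PySem.List.slice xs (some i) none = xs.drop (pvKn xs.length i) := by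
  by_cases hi : i < 0
  · obtain ⟨m, hm, rfl⟩ : ∃ m : Nat, 0 < m ∧ i = -(m : Int) := ⟨(-i).toNat, by omega, by omega⟩
    rw [PySem.List.slice_from_neg_natCast xs m hm]
    congr 1
    simp only [pvKn, if_pos (show -(m : Int) < 0 by omega)]
    omega
  · rw [PySem.List.slice_from xs (by omega)]
    congr 1
    simp only [pvKn, if_neg hi]

lemma pv_slice_to_eq {α : Type} (xs : List α) (i : Int)
    (h1 : -(xs.length : Int) ≤ i) (h2 : i < xs.length) :
    PySem.List.slice xs none (some i) = xs.take (pvKn xs.length i) := by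
  by_cases hi : i < 0
  · obtain ⟨m, hm, rfl⟩ : ∃ m : Nat, 0 < m ∧ i = -(m : Int) := ⟨(-i).toNat, by omega, by omega⟩
    rw [PySem.List.slice_to_neg_natCast xs m hm]
    congr 1
    simp only [pvKn, if_pos (show -(m : Int) < 0 by omega)]
    omega
  · rw [PySem.List.slice_to xs (by omega)]
    congr 1
    simp only [pvKn, if_neg hi]

lemma pv_k_lt (heights : List Int) (bin_ref : Int)
    (h1 : -(heights.length : Int) ≤ bin_ref) (h2 : bin_ref < heights.length) :
    pvKn heights.length bin_ref < heights.length := by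
  simp only [pvKn]; split_ifs <;> omega

lemma pv_get_eq (heights : List Int) (bin_ref : Int)
    (h1 : -(heights.length : Int) ≤ bin_ref) (h2 : bin_ref < heights.length) :
    PySem.List.pyGet? heights bin_ref
      = some (heights.getD (pvKn heights.length bin_ref) 0) := by
  by_cases hi : bin_ref < 0
  · obtain ⟨m, hm, hmle, rfl⟩ : ∃ m : Nat, 0 < m ∧ m ≤ heights.length ∧ bin_ref = -(m : Int) :=
      ⟨(-bin_ref).toNat, by omega, by omega, by omega⟩
    have hkm : pvKn heights.length (-(m : Int)) = heights.length - m := by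
      simp only [pvKn, if_pos (show -(m : Int) < 0 by omega)]; omega
    have hlt : heights.length - m < heights.length := by omega
    rw [PySem.List.pyGet?_neg_natCast heights m hm hmle,
        List.getElem?_eq_getElem hlt, hkm, List.getD_eq_getElem heights 0 hlt]
  · have hkm : pvKn heights.length bin_ref = bin_ref.toNat := by simp only [pvKn, if_neg hi]
    have hlt : bin_ref.toNat < heights.length := by omega
    rw [PySem.List.pyGet?_of_nonneg heights (by omega : 0 ≤ bin_ref),
        List.getElem?_eq_getElem hlt, hkm, List.getD_eq_getElem heights 0 hlt]

def pvS (heights : List Int) (bin_ref : Int) : Nat :=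
  pvLastLowSucc (heights.getD (pvKn heights.length bin_ref) 0)
    (heights.take (pvKn heights.length bin_ref))

def pvF (heights : List Int) (bin_ref : Int) : Nat :=
  pvFirstLow (heights.getD (pvKn heights.length bin_ref) 0)
    (heights.drop (pvKn heights.length bin_ref))

lemma pv_alt_eq (heights : List Int) (bin_ref : Int)
    (h1 : -(heights.length : Int) ≤ bin_ref) (h2 : bin_ref < heights.length) :
    dims_rectangle_by_bin_alt heights bin_ref =
      ((pvKn heights.length bin_ref : Int) + pvF heights bin_ref - pvS heights bin_ref,
       heights.getD (pvKn heights.length bin_ref) 0,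
       (pvS heights bin_ref : Int),
       (pvKn heights.length bin_ref : Int) + pvF heights bin_ref) := by
  have hk := pv_k_lt heights bin_ref h1 h2
  have hkk : (if bin_ref < 0 then bin_ref + (heights.length : Int) else bin_ref).toNat
      = pvKn heights.length bin_ref := rfl
  simp only [dims_rectangle_by_bin_alt, hkk]
  rw [pv_leftScan_eq _ _ _ (le_of_lt hk)]
  have hr := pv_rightScan_eq heights (heights.getD (pvKn heights.length bin_ref) 0)
      heights.length (pvKn heights.length bin_ref) hk (by omega) (le_refl _)
  simp only [Prod.mk.injEq, pvS, pvF]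
  refine ⟨by omega, trivial, trivial, by omega⟩

lemma pv_a_eq (heights : List Int) (bin_ref : Int)
    (h1 : -(heights.length : Int) ≤ bin_ref) (h2 : bin_ref < heights.length) :
    dims_rectangle_by_bin heights bin_ref =
      (if bin_ref < 0 ∧ ∃ x ∈ heights.drop (pvKn heights.length bin_ref),
            x < heights.getD (pvKn heights.length bin_ref) 0 then
        ((pvKn heights.length bin_ref : Int) + pvF heights bin_ref - heights.length
            - pvS heights bin_ref,
         heights.getD (pvKn heights.length bin_ref) 0,
         (pvS heights bin_ref : Int),
         (pvKn heights.length bin_ref : Int) + pvF heights bin_ref - heights.length)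
      else
        ((pvKn heights.length bin_ref : Int) + pvF heights bin_ref - pvS heights bin_ref,
         heights.getD (pvKn heights.length bin_ref) 0,
         (pvS heights bin_ref : Int),
         (pvKn heights.length bin_ref : Int) + pvF heights bin_ref)) := by
  have hget := pv_get_eq heights bin_ref h1 h2
  have hk : pvKn heights.length bin_ref < heights.length := pv_k_lt heights bin_ref h1 h2
  simp only [dims_rectangle_by_bin, hget]
  simp only [pvS, pvF]
  set k := pvKn heights.length bin_ref with hkdef
  set bh := heights.getD k 0 with hbhdef
  have hlen : 1 ≤ heights.length := by omega
  have hkc : (k : Int) = if bin_ref < 0 then bin_ref + heights.length else bin_ref := by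
    rw [hkdef]; simp only [pvKn]; split_ifs <;> omega
  have hbhk : bh = heights[k]'hk := by rw [hbhdef, List.getD_eq_getElem]
  have hLm : (heights.map fun h_ => decide (h_ ≥ bh)).length = heights.length :=
    List.length_map _
  have hsf : PySem.List.slice (heights.map fun h_ => decide (h_ ≥ bh)) (some bin_ref) none
      = (heights.drop k).map (fun h_ => decide (h_ ≥ bh)) := by
    rw [pv_slice_from_eq _ bin_ref (by rw [hLm]; exact h1) (by rw [hLm]; exact h2), hLm,
      ← hkdef]
    exact List.map_drop.symm
  have hst : PySem.List.slice (heights.map fun h_ => decide (h_ ≥ bh)) none (some bin_ref)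
      = (heights.take k).map (fun h_ => decide (h_ ≥ bh)) := by
    rw [pv_slice_to_eq _ bin_ref (by rw [hLm]; exact h1) (by rw [hLm]; exact h2), hLm,
      ← hkdef]
    exact List.map_take.symm
  have htklen : (heights.take k).length = k := by simp [List.length_take]; omega
  have hslen : pvLastLowSucc bh (heights.take k) ≤ k := by
    have := pv_lastLow_le bh (heights.take k); omega
  by_cases hb0 : bin_ref = 0
  · -- reference bin at the left edge
    subst hb0
    have hk0 : k = 0 := by rw [hkdef]; simp [pvKn]
    rw [if_pos rfl, if_neg (show ¬((0:Int) < 0 ∧ ∃ x ∈ heights.drop k, x < bh) by simp)]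
    rw [hsf, hk0]
    simp only [List.drop_zero, List.take_zero]
    simp only [pv_mem_false]
    have hs0 : pvLastLowSucc bh ([] : List Int) = 0 := rfl
    by_cases hx : ∃ x ∈ heights, x < bh
    · rw [if_pos hx, pv_index_first bh heights hx]
      simp only [Prod.mk.injEq, Option.getD_some]
      refine ⟨by omega, trivial, by omega, by omega⟩
    · rw [if_neg hx]
      have hF : pvFirstLow bh heights = heights.length := pv_firstLow_all bh heights hx
      simp only [Prod.mk.injEq]
      refine ⟨by omega, trivial, by omega, by omega⟩
  · by_cases hbl : bin_ref = (heights.length : Int) - 1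
    · -- reference bin at the right edge
      have hbnn : ¬ bin_ref < 0 := by omega
      have hkk : k = heights.length - 1 := by
        rw [hkdef]; simp only [pvKn, if_neg hbnn]; omega
      have hk1 : k + 1 = heights.length := by omega
      rw [if_neg hb0, if_pos hbl,
        if_neg (show ¬(bin_ref < 0 ∧ ∃ x ∈ heights.drop k, x < bh) from fun hc => hbnn hc.1)]
      rw [hst]
      simp only [pv_mem_false]
      have hdropk : heights.drop k = [heights[k]'hk] := by
        rw [List.drop_eq_getElem_cons hk, List.drop_eq_nil_of_le (by omega)]
      have hF1 : pvFirstLow bh (heights.drop k) = 1 := by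
        rw [hdropk, pvFirstLow, if_neg (by omega), pvFirstLow]
      by_cases hx : ∃ x ∈ heights.take k, x < bh
      · have hxall : ∃ x ∈ heights, x < bh := by
          obtain ⟨x, hx1, hx2⟩ := hx
          exact ⟨x, List.mem_of_mem_take hx1, hx2⟩
        rw [if_pos hx, pv_index_rev bh heights hxall]
        have htakes : heights.take (k + 1) = heights.take k ++ [heights[k]'hk] := by
          rw [List.take_succ]; simp [List.getElem?_eq_getElem hk]
        have hlls : pvLastLowSucc bh heights = pvLastLowSucc bh (heights.take k) := by
          conv_lhs => rw [← List.take_length (l := heights), ← hk1, htakes]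
          rw [pv_lastLow_append, if_neg (by omega)]
        rw [hlls]
        simp only [Prod.mk.injEq, Option.getD_some]
        refine ⟨by omega, trivial, by omega, by omega⟩
      · rw [if_neg hx]
        have hs0 : pvLastLowSucc bh (heights.take k) = 0 := pv_lastLow_all bh _ hx
        simp only [Prod.mk.injEq]
        refine ⟨by omega, trivial, by omega, by omega⟩
    · -- interior (or wrapped-negative) reference bin
      rw [if_neg hb0, if_neg hbl]
      rw [hsf, hst]
      simp only [pv_mem_false]
      by_cases hx : ∃ x ∈ heights.take k, x < bh
      · rw [if_pos hx]
        rw [List.length_map, pv_index_rev bh (heights.take k) hx]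
        by_cases hy : ∃ x ∈ heights.drop k, x < bh
        · rw [if_pos hy, pv_index_first bh (heights.drop k) hy]
          by_cases hneg : bin_ref < 0
          · rw [if_pos ⟨hneg, hy⟩]
            simp only [Prod.mk.injEq, Option.getD_some]
            rw [hkc] at *
            refine ⟨by omega, trivial, by omega, by omega⟩
          · rw [if_neg (show ¬(bin_ref < 0 ∧ ∃ x ∈ heights.drop k, x < bh) from fun hc => hneg hc.1)]
            simp only [Prod.mk.injEq, Option.getD_some]
            rw [hkc] at *
            refine ⟨by omega, trivial, by omega, by omega⟩
        · rw [if_neg hy, if_neg (show ¬(bin_ref < 0 ∧ ∃ x ∈ heights.drop k, x < bh) from fun hc => hy hc.2)]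
          have hF : pvFirstLow bh (heights.drop k) = (heights.drop k).length :=
            pv_firstLow_all bh _ hy
          have hdl : (heights.drop k).length = heights.length - k := List.length_drop
          simp only [Prod.mk.injEq, Option.getD_some]
          refine ⟨by omega, trivial, by omega, by omega⟩
      · rw [if_neg hx]
        have hs0 : pvLastLowSucc bh (heights.take k) = 0 := pv_lastLow_all bh _ hx
        by_cases hy : ∃ x ∈ heights.drop k, x < bh
        · rw [if_pos hy, pv_index_first bh (heights.drop k) hy]
          by_cases hneg : bin_ref < 0
          · rw [if_pos ⟨hneg, hy⟩]
            simp only [Prod.mk.injEq, Option.getD_some]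
            rw [hkc] at *
            refine ⟨by omega, trivial, by omega, by omega⟩
          · rw [if_neg (show ¬(bin_ref < 0 ∧ ∃ x ∈ heights.drop k, x < bh) from fun hc => hneg hc.1)]
            simp only [Prod.mk.injEq, Option.getD_some]
            rw [hkc] at *
            refine ⟨by omega, trivial, by omega, by omega⟩
        · rw [if_neg hy, if_neg (show ¬(bin_ref < 0 ∧ ∃ x ∈ heights.drop k, x < bh) from fun hc => hy hc.2)]
          have hF : pvFirstLow bh (heights.drop k) = (heights.drop k).length :=
            pv_firstLow_all bh _ hy
          have hdl : (heights.drop k).length = heights.length - k := List.length_drop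
          simp only [Prod.mk.injEq]
          refine ⟨by omega, trivial, by omega, by omega⟩

-- ===== VERDICT (by name: the statement is the Claim_ definition above) =====
theorem dims_rectangle_by_bin_spec : Claim_unchanged_dims_rectangle_by_bin := by
  intro heights bin_ref hdom hpre hnd
  obtain ⟨h1, h2⟩ := hpre
  rw [pv_a_eq heights bin_ref h1 h2, pv_alt_eq heights bin_ref h1 h2]
  rw [if_neg (show ¬(bin_ref < 0 ∧ ∃ x ∈ heights.drop (pvKn heights.length bin_ref),
      x < heights.getD (pvKn heights.length bin_ref) 0) from fun hc =>
    hnd ⟨hc.1, h1, by simpa [pvKn, if_pos hc.1] using hc.2⟩)]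

theorem dims_rectangle_by_bin_changed : Claim_changed_dims_rectangle_by_bin := by
  unfold Claim_changed_dims_rectangle_by_bin; decide

theorem dims_rectangle_by_bin_tight : Claim_exact_dims_rectangle_by_bin := by
  intro heights bin_ref hdom hpre hd heq
  obtain ⟨h1, h2⟩ := hpre
  obtain ⟨hneg, _, hex⟩ := hd
  have hex' : ∃ x ∈ heights.drop (pvKn heights.length bin_ref),
      x < heights.getD (pvKn heights.length bin_ref) 0 := by
    simpa [pvKn, if_pos hneg] using hex
  rw [pv_a_eq heights bin_ref h1 h2, pv_alt_eq heights bin_ref h1 h2,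
    if_pos ⟨hneg, hex'⟩] at heq
  have h4 := congrArg (fun t => t.2.2.2) heq
  simp only at h4
  omega
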